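-- pv_equiv track=rewrite | github.com/sazzadi-r14/CS-106A | crypto/crypto.py | compute_slug
-- ===== SOURCE A (Python) =====
-- ALPHABET = ['a', 'b', 'c', 'd', 'e', 'f', 'g', 'h', 'i', 'j', 'k', 'l', 'm', 'n', 'o', 'p', 'q', 'r', 's', 't', 'u',
--             'v', 'w', 'x', 'y', 'z']
--
-- def compute_slug(key):
--     """
--     Given a key string, compute and return the len-26 slug list for it.
--     >>> compute_slug('z')
--     ['z', 'a', 'b', 'c', 'd', 'e', 'f', 'g', 'h', 'i', 'j', 'k', 'l', 'm', 'n', 'o', 'p', 'q', 'r', 's', 't', 'u', 'v', 'w', 'x', 'y']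
--     >>> compute_slug('Bananas!')
--     ['b', 'a', 'n', 's', 'c', 'd', 'e', 'f', 'g', 'h', 'i', 'j', 'k', 'l', 'm', 'o', 'p', 'q', 'r', 't', 'u', 'v', 'w', 'x', 'y', 'z']
--     >>> compute_slug('Life, Liberty, and')
--     ['l', 'i', 'f', 'e', 'b', 'r', 't', 'y', 'a', 'n', 'd', 'c', 'g', 'h', 'j', 'k', 'm', 'o', 'p', 'q', 's', 'u', 'v', 'w', 'x', 'z']
--     >>> compute_slug('Zounds!')
--     ['z', 'o', 'u', 'n', 'd', 's', 'a', 'b', 'c', 'e', 'f', 'g', 'h', 'i', 'j', 'k', 'l', 'm', 'p', 'q', 'r', 't', 'v', 'w', 'x', 'y']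
--     """
--     slug = []
--     conv_key = key.lower()
--     for i in range(len(key)):
--         if conv_key[i].isalpha() and conv_key[i] not in slug: #To add the key
--             slug.append(conv_key[i])
--     for j in range(len(ALPHABET)): #To add the alphabet
--         if ALPHABET[j] not in slug:
--             slug.append(ALPHABET[j])
--
--     return slug
-- ===== SOURCE B (Python) =====
-- ALPHABET = ['a', 'b', 'c', 'd', 'e', 'f', 'g', 'h', 'i', 'j', 'k', 'l', 'm', 'n', 'o', 'p', 'q', 'r', 's', 't', 'u',
--             'v', 'w', 'x', 'y', 'z']
--
-- def compute_slug(key):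
--     first_seen = {}
--     for ch in key.lower():
--         if ch.isalpha() and ch not in first_seen:
--             first_seen[ch] = len(first_seen)
--     return sorted(ALPHABET, key=lambda c: first_seen.get(c, 26))
-- ===== Notes on version B (the rewrite author's own statement) =====
-- stated objective: faster
-- what changed: Replaces A's two append-with-membership-scan loops by building a first-seen rank dict over the key in one pass and returning sorted(ALPHABET, key=rank) with default rank 26, relying on sort stability for the non-key letters.
import Mathlib
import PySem

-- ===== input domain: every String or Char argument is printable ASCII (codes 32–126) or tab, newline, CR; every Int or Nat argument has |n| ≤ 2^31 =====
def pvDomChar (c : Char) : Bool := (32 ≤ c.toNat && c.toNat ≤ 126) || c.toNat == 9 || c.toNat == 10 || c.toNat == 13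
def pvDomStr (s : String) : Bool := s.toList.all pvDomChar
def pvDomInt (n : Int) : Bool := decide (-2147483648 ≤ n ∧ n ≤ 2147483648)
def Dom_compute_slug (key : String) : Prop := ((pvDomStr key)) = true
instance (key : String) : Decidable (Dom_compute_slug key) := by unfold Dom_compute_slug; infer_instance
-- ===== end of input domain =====

-- B replaces A's two append-with-membership loops by a first-seen rank table plus one stable sort of the fixed alphabet; same return value, no side effects.

def pyALPHABET : List String := ["a","b","c","d","e","f","g","h","i","j","k","l","m","n","o","p","q","r","s","t","u","v","w","x","y","z"]

-- ===== PORT A =====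
-- body of A's first loop: 'if conv_key[i].isalpha() and conv_key[i] not in slug: slug.append(conv_key[i])'
def pvStepA (slug : List String) (ch : Char) : List String :=
  let c := String.ofList [ch]
  if PySem.Str.isalpha ch && !(slug.contains c) then slug ++ [c] else slug

-- body of A's second loop: 'if ALPHABET[j] not in slug: slug.append(ALPHABET[j])'
def pvStepA2 (slug : List String) (c : String) : List String :=
  if !(slug.contains c) then slug ++ [c] else slug

def compute_slug (key : String) : List String :=
  let conv_key := PySem.Str.lower key
  let slug :=
    (PySem.List.pyRange 0 (PySem.Str.len key) 1).foldl
      (fun slug i => pvStepA slug ((PySem.Str.pyGet? conv_key i).getD ' ')) []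
      -- the .getD ' ' default is never used: i ranges over valid indices of conv_key
  (PySem.List.pyRange 0 (PySem.List.len pyALPHABET) 1).foldl
    (fun slug j => pvStepA2 slug (PySem.List.pyGetD pyALPHABET j "")) slug

-- ===== PORT B =====
-- body of B's loop: 'if ch.isalpha() and ch not in first_seen: first_seen[ch] = len(first_seen)'
def pvStepB (d : PySem.Dict String Int) (ch : Char) : PySem.Dict String Int :=
  let c := String.ofList [ch]
  if PySem.Str.isalpha ch && !(PySem.Dict.contains d c) then PySem.Dict.insert d c (PySem.Dict.size d : Int) else d

def compute_slug_alt (key : String) : List String :=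
  let first_seen := (PySem.Str.lower key).toList.foldl pvStepB PySem.Dict.empty
  PySem.List.sorted pyALPHABET (fun c => PySem.Dict.getD first_seen c 26) false

-- ===== PRECONDITION & SPEC =====
def Spec_compute_slug (key : String) (out : List String) : Prop := out = compute_slug_alt key
instance (key : String) (out : List String) : Decidable (Spec_compute_slug key out) := by unfold Spec_compute_slug; infer_instance

-- ===== CLAIM (what is proved, stated in full; the proofs are below) =====
def Claim_equal_compute_slug : Prop := ∀ (key : String), Dom_compute_slug key → Spec_compute_slug key (compute_slug key)

-- ===== LEMMAS AND PROOFS =====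

-- the deduped alphabetic letters of key.lower(), in first-occurrence order (A's first loop), and B's rank dict
def pvL (key : String) : List String := (PySem.Chars.lower key.toList).foldl pvStepA []
def pvD (key : String) : PySem.Dict String Int := (PySem.Chars.lower key.toList).foldl pvStepB PySem.Dict.empty

def alphaChars : List Char := ['a','b','c','d','e','f','g','h','i','j','k','l','m','n','o','p','q','r','s','t','u','v','w','x','y','z']

-- joint invariant of A's first loop and B's dict-building loop
def pvInv (slug : List String) (d : PySem.Dict String Int) : Prop :=
  (∀ s, s ∉ slug → d.get? s = none) ∧
  (∀ s ∈ slug, ∃ v : Int, d.get? s = some v ∧ 0 ≤ v ∧ v < (slug.length : Int)) ∧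
  slug.Pairwise (fun a b => PySem.Dict.getD d a 26 < PySem.Dict.getD d b 26) ∧
  PySem.Dict.size d = slug.length ∧
  slug.Nodup ∧
  (∀ s ∈ slug, s ∈ pyALPHABET)

lemma dict_contains_eq_isSome {ν : Type} (d : PySem.Dict String ν) (k : String) :
    d.contains k = (d.get? k).isSome := by
  rw [PySem.Dict.contains, PySem.Dict.get?, Bool.eq_iff_iff]
  simp [List.any_eq_true, List.find?_isSome]

lemma insertBy_middle {α : Type} (before : α → α → Bool) (x : α) :
    ∀ (as bs : List α), (∀ a ∈ as, before x a = false) → (∀ b ∈ bs, before x b = true) →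
    PySem.List.insertBy before x (as ++ bs) = as ++ x :: bs := by
  intro as
  induction as with
  | nil =>
    intro bs _ hbs
    cases bs with
    | nil => simp [PySem.List.insertBy]
    | cons b bs => simp [PySem.List.insertBy, hbs b (List.mem_cons_self)]
  | cons a as ih =>
    intro bs has hbs
    simp only [List.cons_append, PySem.List.insertBy, has a (List.mem_cons_self)]
    simp [ih bs (fun a ha => has a (List.mem_cons_of_mem _ ha)) hbs]

lemma filter_split (rank : String → Int) :
    ∀ (L : List String), (L.Pairwise fun a b => rank a < rank b) →
    ∀ (x : String), x ∈ L → ∀ (p : String → Bool), p x = false →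
    ∃ as bs, L.filter p = as ++ bs ∧
      L.filter (fun s => p s || s == x) = as ++ x :: bs ∧
      (∀ a ∈ as, rank a < rank x) ∧ (∀ b ∈ bs, rank x < rank b) := by
  intro L
  induction L with
  | nil => intro _ x hx; simp at hx
  | cons h t ih =>
    intro hpw x hx p hpx
    have hpw' := (List.pairwise_cons.mp hpw).2
    have hhead := (List.pairwise_cons.mp hpw).1
    by_cases hxh : x = h
    · subst hxh
      refine ⟨[], t.filter p, ?_, ?_, by simp, ?_⟩
      · simp [hpx]
      · have ht : t.filter (fun s => p s || s == x) = t.filter p := by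
          apply List.filter_congr
          intro s hs
          have : s ≠ x := by
            intro he; subst he; exact lt_irrefl _ (hhead s hs)
          simp [this]
        simp [hpx, ht]
      · intro b hb
        exact hhead b (List.mem_of_mem_filter hb)
    · have hxt : x ∈ t := by
        rcases hx with _ | h2
        · exact absurd rfl hxh
        · assumption
      obtain ⟨as, bs, h1, h2, h3, h4⟩ := ih hpw' x hxt p hpx
      by_cases hph : p h = true
      · refine ⟨h :: as, bs, ?_, ?_, ?_, h4⟩
        · simp [List.filter_cons, hph, h1]
        · simp [List.filter_cons, hph, h2]
        · intro a ha
          rcases List.mem_cons.mp ha with rfl | ha2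
          · exact hhead x hxt
          · exact h3 a ha2
      · have hph' : p h = false := by simpa using hph
        have hhx : (h == x) = false := by
          simp [Ne.symm hxh]
        refine ⟨as, bs, ?_, ?_, h3, h4⟩
        · simp [List.filter_cons, hph', h1]
        · simp [List.filter_cons, hph', hhx, h2]

-- what insertion sort computes starting from an already-processed prefix: stable-sort characterization
lemma sort_fold (rank : String → Int) (L : List String)
    (hpw : L.Pairwise fun a b => rank a < rank b)
    (hlt : ∀ s ∈ L, rank s < 26)
    (hoff : ∀ s, s ∉ L → rank s = 26) :
    ∀ (xs : List String), xs.Nodup → ∀ (p : String → Bool), (∀ s ∈ xs, p s = false) →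
    ∀ (r : List String), (∀ s ∈ r, rank s = 26) →
    xs.foldl (fun acc x => PySem.List.insertBy (fun a b => decide (rank a < rank b)) x acc) (L.filter p ++ r)
      = L.filter (fun s => p s || xs.contains s) ++ (r ++ xs.filter (fun x => !(L.contains x))) := by
  intro xs
  induction xs with
  | nil => intro _ p hp r hr; simp
  | cons x xs ih =>
    intro hnd p hp r hr
    have hndx : xs.Nodup := (List.nodup_cons.mp hnd).2
    have hxnotin : x ∉ xs := (List.nodup_cons.mp hnd).1
    have hpx : p x = false := hp x (List.mem_cons_self)
    by_cases hxL : x ∈ L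
    · -- insert into the L-part
      obtain ⟨as, bs, h1, h2, h3, h4⟩ := filter_split rank L hpw x hxL p hpx
      have hins : PySem.List.insertBy (fun a b => decide (rank a < rank b)) x (List.filter p L ++ r)
          = L.filter (fun s => p s || s == x) ++ r := by
        rw [h1, List.append_assoc]
        rw [insertBy_middle _ _ as (bs ++ r) ?_ ?_]
        · rw [h2]; simp
        · intro a ha; simpa using not_lt.mpr (le_of_lt (h3 a ha))
        · intro b hb
          rcases List.mem_append.mp hb with hb | hb
          · simpa using h4 b hb
          · have := hr b hb
            have hx26 : rank x < 26 := hlt x hxL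
            simp [this]; omega
      simp only [List.foldl_cons, hins]
      rw [ih hndx (fun s => p s || s == x) ?_ r hr]
      · congr 1
        · apply List.filter_congr
          intro s _
          by_cases hsx : s = x
          · subst hsx; simp
          · have hb : (s == x) = false := beq_eq_false_iff_ne.mpr hsx
            simp [hb, hsx]
        · congr 1
          simp [List.filter_cons, hxL]
      · intro s hs
        have h1 := hp s (List.mem_cons_of_mem _ hs)
        have h2 : s ≠ x := fun he => hxnotin (he ▸ hs)
        simp [h1, h2]
    · -- append at the end
      have hins : PySem.List.insertBy (fun a b => decide (rank a < rank b)) x (List.filter p L ++ r)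
          = L.filter p ++ (r ++ [x]) := by
        rw [PySem.List.insertBy_of_forall_not_before]
        · rw [List.append_assoc]
        · intro y hy
          rcases List.mem_append.mp hy with hy | hy
          · have := hlt y (List.mem_of_mem_filter hy)
            have := hoff x hxL
            simp; omega
          · have := hr y hy
            have := hoff x hxL
            simp; omega
      simp only [List.foldl_cons, hins]
      rw [ih hndx p (fun s hs => hp s (List.mem_cons_of_mem _ hs)) (r ++ [x]) ?_]
      · congr 1
        · apply List.filter_congr
          intro s hsL
          have hsx : s ≠ x := fun he => hxL (he ▸ hsL)
          have hb : (s == x) = false := beq_eq_false_iff_ne.mpr hsx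
          simp [hb, hsx]
        · simp [List.filter_cons, hxL]
      · intro s hs
        rcases List.mem_append.mp hs with hs | hs
        · exact hr s hs
        · simp at hs; subst hs; exact hoff s hxL

lemma loop2 : ∀ (xs acc : List String), xs.Nodup →
    xs.foldl pvStepA2 acc = acc ++ xs.filter (fun c => !(acc.contains c)) := by
  intro xs
  induction xs with
  | nil => intro acc _; simp
  | cons x xs ih =>
    intro acc hnd
    have hx : x ∉ xs := (List.nodup_cons.mp hnd).1
    have hnd' : xs.Nodup := (List.nodup_cons.mp hnd).2
    by_cases hmem : x ∈ acc
    · have hc : acc.contains x = true := by simpa using hmem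
      simp only [List.foldl_cons, pvStepA2, hc, Bool.not_true, if_false]
      rw [if_neg (by simp), ih acc hnd']
      simp [List.filter_cons, hmem]
    · have hc : acc.contains x = false := by simpa using hmem
      simp only [List.foldl_cons, pvStepA2, hc, Bool.not_false]
      rw [if_pos (by simp [hc]), ih (acc ++ [x]) hnd']
      have hfil : xs.filter (fun c => !((acc ++ [x]).contains c)) = xs.filter (fun c => !(acc.contains c)) := by
        apply List.filter_congr
        intro s hs
        have hsx : (s == x) = false := beq_eq_false_iff_ne.mpr (fun he => hx (he ▸ hs))
        simp [hsx]
        intro _; exact beq_eq_false_iff_ne.mp hsx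
      rw [hfil]
      simp [List.filter_cons, hmem]

lemma pyALPHABET_eq : pyALPHABET = alphaChars.map (fun c => String.ofList [c]) := by decide

lemma mem_alphaChars_of_bounds (c : Char) (h1 : 97 ≤ c.toNat) (h2 : c.toNat ≤ 122) : c ∈ alphaChars := by
  have hofn : Char.ofNat c.toNat = c := Char.ofNat_toNat c
  have : Char.ofNat c.toNat ∈ alphaChars := by
    interval_cases h : c.toNat <;> decide
  rwa [hofn] at this

lemma isupper_bounds (c : Char) (h : PySem.Chars.isupper c = true) : 65 ≤ c.toNat ∧ c.toNat ≤ 90 := by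
  simp only [PySem.Chars.isupper, Bool.and_eq_true, decide_eq_true_eq] at h
  obtain ⟨h1, h2⟩ := h
  rw [Char.le_def, UInt32.le_iff_toNat_le] at h1 h2
  exact ⟨h1, h2⟩

lemma islower_bounds (c : Char) (h : PySem.Chars.islower c = true) : 97 ≤ c.toNat ∧ c.toNat ≤ 122 := by
  simp only [PySem.Chars.islower, Bool.and_eq_true, decide_eq_true_eq] at h
  obtain ⟨h1, h2⟩ := h
  rw [Char.le_def, UInt32.le_iff_toNat_le] at h1 h2
  exact ⟨h1, h2⟩

lemma toNat_ofNat_small (n : Nat) (h : n < 1000) : (Char.ofNat n).toNat = n := by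
  rw [Char.toNat_ofNat, if_pos]
  unfold Nat.isValidChar
  left; omega

lemma alpha_mem (c : Char) (h : PySem.Chars.isalpha c = true) (hlo : ∃ c0, c = PySem.Chars.lowerChar c0) :
    String.ofList [c] ∈ pyALPHABET := by
  obtain ⟨c0, rfl⟩ := hlo
  rw [pyALPHABET_eq]
  apply List.mem_map_of_mem
  unfold PySem.Chars.lowerChar at h ⊢
  by_cases hu : PySem.Chars.isupper c0 = true
  · rw [if_pos hu] at h ⊢
    obtain ⟨h1, h2⟩ := isupper_bounds c0 hu
    have ht : (Char.ofNat (c0.toNat + 32)).toNat = c0.toNat + 32 := toNat_ofNat_small _ (by omega)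
    exact mem_alphaChars_of_bounds _ (by omega) (by omega)
  · rw [if_neg hu] at h ⊢
    have : PySem.Chars.islower c0 = true := by
      simp only [PySem.Chars.isalpha, Bool.or_eq_true] at h
      rcases h with h | h
      · exact absurd h hu
      · exact h
    obtain ⟨h1, h2⟩ := islower_bounds c0 this
    exact mem_alphaChars_of_bounds _ h1 h2

lemma loop1 : ∀ (cs : List Char) (slug : List String) (d : PySem.Dict String Int),
    (∀ c ∈ cs, PySem.Chars.isalpha c = true → String.ofList [c] ∈ pyALPHABET) →
    pvInv slug d → pvInv (cs.foldl pvStepA slug) (cs.foldl pvStepB d) := by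
  intro cs
  induction cs with
  | nil => intro slug d _ hinv; exact hinv
  | cons ch cs ih =>
    intro slug d halpha hinv
    obtain ⟨inv1, inv2, inv3, inv4, inv5, inv6⟩ := hinv
    have htail : ∀ c ∈ cs, PySem.Chars.isalpha c = true → String.ofList [c] ∈ pyALPHABET :=
      fun c hc => halpha c (List.mem_cons_of_mem _ hc)
    set s := String.ofList [ch] with hs
    by_cases ha : PySem.Chars.isalpha ch = true
    · by_cases hmem : s ∈ slug
      · -- letter already recorded: both loops skip
        have hcs : slug.contains s = true := by simpa using hmem
        have hcd : d.contains s = true := by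
          rw [dict_contains_eq_isSome]
          obtain ⟨v, hv, _, _⟩ := inv2 s hmem
          simp [hv]
        simp only [List.foldl_cons]
        have e1 : pvStepA slug ch = slug := by simp [pvStepA, ← hs, hcs, hmem]
        have e2 : pvStepB d ch = d := by simp [pvStepB, ← hs, hcd]
        rw [e1, e2]
        exact ih slug d htail ⟨inv1, inv2, inv3, inv4, inv5, inv6⟩
      · -- fresh letter: append / insert with the next rank
        have hcs : slug.contains s = false := by simpa using hmem
        have hcd : d.contains s = false := by
          rw [dict_contains_eq_isSome, inv1 s hmem]; rfl
        simp only [List.foldl_cons]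
        have e1 : pvStepA slug ch = slug ++ [s] := by
          simp [pvStepA, ← hs, hcs, ha, PySem.Str.isalpha, hmem]
        have e2 : pvStepB d ch = d.insert s (d.size : Int) := by
          simp [pvStepB, ← hs, hcd, ha, PySem.Str.isalpha]
        rw [e1, e2]
        apply ih _ _ htail
        have hgne : ∀ t, t ≠ s → (d.insert s (d.size : Int)).get? t = d.get? t :=
          fun t ht => PySem.Dict.get?_insert_of_ne d _ ht
        refine ⟨?_, ?_, ?_, ?_, ?_, ?_⟩
        · intro t ht
          simp only [List.mem_append, List.mem_singleton, not_or] at ht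
          rw [hgne t ht.2, inv1 t ht.1]
        · intro t ht
          rcases List.mem_append.mp ht with ht | ht
          · obtain ⟨v, hv, h0, hb⟩ := inv2 t ht
            have htne : t ≠ s := fun he => hmem (he ▸ ht)
            refine ⟨v, by rw [hgne t htne]; exact hv, h0, ?_⟩
            simp only [List.length_append, List.length_singleton]
            push_cast
            omega
          · simp only [List.mem_singleton] at ht
            subst ht
            refine ⟨(d.size : Int), PySem.Dict.get?_insert_self d _ _, by positivity, ?_⟩
            rw [inv4]
            simp only [List.length_append, List.length_singleton]
            push_cast
            omega
        · rw [List.pairwise_append]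
          refine ⟨?_, by simp, ?_⟩
          · apply List.Pairwise.imp_of_mem ?_ inv3
            intro a b haa hbb hab
            have hane : a ≠ s := fun he => hmem (he ▸ haa)
            have hbne : b ≠ s := fun he => hmem (he ▸ hbb)
            rwa [PySem.Dict.getD_insert_of_ne d _ _ hane, PySem.Dict.getD_insert_of_ne d _ _ hbne]
          · intro a haa b hbb
            simp only [List.mem_singleton] at hbb
            subst hbb
            have hane : a ≠ s := fun he => hmem (he ▸ haa)
            rw [PySem.Dict.getD_insert_of_ne d _ _ hane, PySem.Dict.getD_insert_self]
            obtain ⟨v, hv, _, hb⟩ := inv2 a haa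
            simp only [PySem.Dict.getD, hv, Option.getD_some]
            rw [inv4] at *
            omega
        · rw [PySem.Dict.size_insert, if_neg (by simp [hcd])]
          simp [inv4]
        · simp only [List.nodup_append, List.nodup_singleton, true_and]
          refine ⟨inv5, ?_⟩
          intro a haa b hbb
          simp only [List.mem_singleton] at hbb
          subst hbb
          exact fun he => hmem (he ▸ haa)
        · intro t ht
          rcases List.mem_append.mp ht with ht | ht
          · exact inv6 t ht
          · simp only [List.mem_singleton] at ht
            subst ht
            exact halpha ch (List.mem_cons_self) ha
    · have ha' : PySem.Chars.isalpha ch = false := by simpa using ha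
      simp only [List.foldl_cons]
      have e1 : pvStepA slug ch = slug := by simp [pvStepA, PySem.Str.isalpha, ha']
      have e2 : pvStepB d ch = d := by simp [pvStepB, PySem.Str.isalpha, ha']
      rw [e1, e2]
      exact ih slug d htail ⟨inv1, inv2, inv3, inv4, inv5, inv6⟩

lemma inv_main (key : String) : pvInv (pvL key) (pvD key) := by
  apply loop1
  · intro c hc halpha
    rw [PySem.Chars.lower] at hc
    obtain ⟨c0, _, rfl⟩ := List.mem_map.mp hc
    exact alpha_mem _ halpha ⟨c0, rfl⟩
  · refine ⟨fun s _ => rfl, by simp, by simp [PySem.Dict.empty], by simp [PySem.Dict.empty, PySem.Dict.size], by simp, by simp⟩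

lemma A_eq (key : String) :
    compute_slug key = pvL key ++ pyALPHABET.filter (fun c => !((pvL key).contains c)) := by
  show (PySem.List.pyRange 0 (PySem.List.len pyALPHABET) 1).foldl
      (fun slug j => pvStepA2 slug (PySem.List.pyGetD pyALPHABET j ""))
      ((PySem.List.pyRange 0 (PySem.Str.len key) 1).foldl
        (fun slug i => pvStepA slug ((PySem.Str.pyGet? (PySem.Str.lower key) i).getD ' ')) [])
      = _
  have hlen : PySem.Str.len key = ((PySem.Str.lower key).toList.length : Int) := by
    rw [PySem.Str.toList_lower, PySem.Chars.lower, List.length_map, PySem.Str.len]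
  rw [hlen]
  have h1 : (PySem.List.pyRange 0 ((PySem.Str.lower key).toList.length : Int) 1).foldl
      (fun slug i => pvStepA slug ((PySem.Str.pyGet? (PySem.Str.lower key) i).getD ' ')) []
      = (PySem.Str.lower key).toList.foldl pvStepA [] :=
    PySem.List.foldl_pyRange_zero_pyGetD' (PySem.Str.lower key).toList ' ' pvStepA []
  rw [h1]
  have h2 : (PySem.Str.lower key).toList.foldl pvStepA [] = pvL key := by
    rw [PySem.Str.toList_lower]; rfl
  rw [h2]
  rw [PySem.List.foldl_pyRange_zero_pyGetD pyALPHABET "" pvStepA2 (pvL key)]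
  exact loop2 pyALPHABET (pvL key) (by decide)

lemma B_eq (key : String) :
    compute_slug_alt key = pvL key ++ pyALPHABET.filter (fun c => !((pvL key).contains c)) := by
  show PySem.List.sorted pyALPHABET
      (fun c => PySem.Dict.getD ((PySem.Str.lower key).toList.foldl pvStepB PySem.Dict.empty) c 26) false
      = _
  have hfs : (PySem.Str.lower key).toList.foldl pvStepB PySem.Dict.empty = pvD key := by
    rw [PySem.Str.toList_lower]; rfl
  rw [hfs]
  obtain ⟨inv1, inv2, inv3, inv4, inv5, inv6⟩ := inv_main key
  have hlen26 : (pvL key).length ≤ 26 := by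
    have := (List.subperm_of_subset inv5 (fun s hs => inv6 s hs)).length_le
    simpa using this
  rw [PySem.List.sorted_eq_foldl_insertBy]
  have h := sort_fold (fun c => PySem.Dict.getD (pvD key) c 26) (pvL key) inv3
    (by
      intro s hsl
      obtain ⟨v, hv, _, hb⟩ := inv2 s hsl
      simp only [PySem.Dict.getD, hv, Option.getD_some]
      omega)
    (by
      intro s hsl
      simp [PySem.Dict.getD, inv1 s hsl])
    pyALPHABET (by decide) (fun _ => false) (fun _ _ => rfl) [] (by simp)
  simp only [List.filter_false, List.nil_append, List.append_nil, Bool.false_or] at h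
  have hfilter : (pvL key).filter (fun s => pyALPHABET.contains s) = pvL key :=
    List.filter_eq_self.mpr (fun s hsl => by simpa using inv6 s hsl)
  rw [h, hfilter]

-- ===== VERDICT (by name: the statement is the Claim_ definition above) =====
theorem compute_slug_spec : Claim_equal_compute_slug := by
  intro key _
  unfold Spec_compute_slug
  rw [A_eq, B_eq]
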